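-- pv_equiv track=rewrite | github.com/xiaomin418/xmMasterFirst | homework3/task1.py | deleteSub
-- ===== SOURCE A (Python) =====
-- def deleteSub(s):
--     i=0
--     while i<len(s):
--         if i+1>=len(s):
--             break
--         if s[i]=='A' and s[i+1]=='B':
--             s.pop(i)
--             s.pop(i)
--             if i>0:
--                 i=i-1
--         elif s[i]=='B' and s[i+1]=='B':
--             s.pop(i)
--             s.pop(i)
--             if i>0:
--                 i=i-1
--         else:
--             i=i+1
--     return len(s)
-- ===== SOURCE B (Python) =====
-- def deleteSub(s):
--     stack = []
--     for x in s:
--         if x == 'B' and stack and (stack[-1] == 'A' or stack[-1] == 'B'):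
--             stack.pop()
--         else:
--             stack.append(x)
--     return len(stack)
-- ===== Notes on version B (the rewrite author's own statement) =====
-- stated objective: faster
-- what changed: Replaced the mutate-and-backtrack scan (repeated list.pop at index i with index rewinds) by a single left-to-right pass maintaining a stack that pops when the current element is 'B' and the top is 'A' or 'B'.
import Mathlib
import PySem

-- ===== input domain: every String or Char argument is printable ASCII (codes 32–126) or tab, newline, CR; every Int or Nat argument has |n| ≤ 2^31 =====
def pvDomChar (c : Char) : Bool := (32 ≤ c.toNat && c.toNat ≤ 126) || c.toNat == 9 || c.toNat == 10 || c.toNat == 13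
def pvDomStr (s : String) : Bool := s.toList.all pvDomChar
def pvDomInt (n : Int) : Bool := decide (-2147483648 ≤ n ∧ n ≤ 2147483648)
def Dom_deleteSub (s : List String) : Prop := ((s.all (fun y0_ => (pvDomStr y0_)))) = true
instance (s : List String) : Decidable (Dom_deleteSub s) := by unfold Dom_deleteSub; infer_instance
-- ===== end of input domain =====

-- B replaces A's quadratic mutate-and-backtrack scan by a single-pass stack (objective: faster).
-- A mutates its argument in place (s.pop); the equivalence proved here is about the return value only.

-- ===== PORT A =====
-- literal port of A's while-loop: state (s, i); 's.pop(i); s.pop(i)' = 's.take i ++ s.drop (i+2)'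
-- fuel = a totality guard only: 2*len(s)-i strictly decreases each iteration, so
-- fuel 2*len(s)+1 is never exhausted and the 0-fuel branch is unreachable
def deleteSubLoop : Nat → List String → Nat → Int
  | 0, s, _ => (s.length : Int)
  | fuel+1, s, i =>
    if i < s.length then
      if i + 1 ≥ s.length then (s.length : Int)
      else if (s.getD i "" == "A" && s.getD (i+1) "" == "B") then
        deleteSubLoop fuel (s.take i ++ s.drop (i+2)) (if 0 < i then i - 1 else i)
      else if (s.getD i "" == "B" && s.getD (i+1) "" == "B") then
        deleteSubLoop fuel (s.take i ++ s.drop (i+2)) (if 0 < i then i - 1 else i)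
      else deleteSubLoop fuel s (i+1)
    else (s.length : Int)

def deleteSub (s : List String) : Int := deleteSubLoop (2 * s.length + 1) s 0

-- ===== PORT B =====
-- the Python stack grows at the end; the Lean stack grows at the head (top = head)
def stackStep (st : List String) (x : String) : List String :=
  if x == "B" && !st.isEmpty && (st.headD "" == "A" || st.headD "" == "B") then st.tail
  else x :: st

def deleteSub_alt (s : List String) : Int :=
  ((s.foldl stackStep []).length : Int)

-- ===== PRECONDITION & SPEC =====
def Spec_deleteSub (s : List String) (out : Int) : Prop := out = deleteSub_alt s
instance (s : List String) (out : Int) : Decidable (Spec_deleteSub s out) := by unfold Spec_deleteSub; infer_instance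

-- ===== CLAIM (what is proved, stated in full; the proofs are below) =====
def Claim_equal_deleteSub : Prop := ∀ (s : List String), Dom_deleteSub s → Spec_deleteSub s (deleteSub s)

-- ===== LEMMAS AND PROOFS =====
def pairMatch (x y : String) : Bool := (x == "A" && y == "B") || (x == "B" && y == "B")

theorem stackStep_push (st : List String) (x : String)
    (h : ∀ t, st.head? = some t → pairMatch t x = false) :
    stackStep st x = x :: st := by
  cases st with
  | nil => simp [stackStep]
  | cons t ts =>
    have ht := h t rfl
    cases hA : t == "A" <;> cases hB : t == "B" <;> cases hx : x == "B" <;>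
      simp_all [stackStep, pairMatch]

theorem stackStep_pop (st : List String) (a b : String) (h : pairMatch a b = true) :
    stackStep (a :: st) b = st := by
  cases hA : a == "A" <;> cases hB : a == "B" <;> cases hx : b == "B" <;>
    simp_all [stackStep, pairMatch]

theorem if_pair_true {α : Type} (a b : String) (X X' Y : α) (hab : pairMatch a b = true) :
    (if (a == "A" && b == "B") = true then X
     else if (a == "B" && b == "B") = true then X' else Y)
      = (if (a == "A" && b == "B") = true then X else X') := by
  cases hc1 : (a == "A" && b == "B") <;> cases hc2 : (a == "B" && b == "B") <;>
    simp_all [pairMatch]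

theorem if_pair_false {α : Type} (a b : String) (X X' Y : α) (hab : pairMatch a b = false) :
    (if (a == "A" && b == "B") = true then X
     else if (a == "B" && b == "B") = true then X' else Y) = Y := by
  cases hc1 : (a == "A" && b == "B") <;> cases hc2 : (a == "B" && b == "B") <;>
    simp_all [pairMatch]

theorem deleteSubLoop_eq_stack : ∀ (n : Nat) (p rest : List String),
    2 * (p.length + rest.length) - p.length < n →
    List.IsChain (fun x y => pairMatch x y = false) (p ++ rest.take 1) →
    deleteSubLoop n (p ++ rest) p.length = ((List.foldl stackStep p.reverse rest).length : Int) := by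
  intro n
  induction n with
  | zero => intro p rest hm _; exact absurd hm (Nat.not_lt_zero _)
  | succ n ih =>
  intro p rest hm hinv
  rcases rest with _ | ⟨a, rest'⟩
  · rw [deleteSubLoop]
    simp
  rcases rest' with _ | ⟨b, r⟩
  · -- rest = [a]
    have hinv1 : List.IsChain (fun x y => pairMatch x y = false) (p ++ [a]) := by
      simpa using hinv
    rw [deleteSubLoop]
    rw [if_pos (by simp), if_pos (by simp)]
    have hb : ∀ t, p.reverse.head? = some t → pairMatch t a = false := by
      intro t ht
      rw [List.head?_reverse] at ht
      exact (List.isChain_append.mp hinv1).2.2 t ht a rfl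
    rw [List.foldl_cons, List.foldl_nil, stackStep_push _ _ hb]
    simp
  · -- rest = a :: b :: r
    have hinv1 : List.IsChain (fun x y => pairMatch x y = false) (p ++ [a]) := by
      simpa using hinv
    have hbound : ∀ t, p.getLast? = some t → pairMatch t a = false :=
      fun t ht => (List.isChain_append.mp hinv1).2.2 t ht a rfl
    have hpush : stackStep p.reverse a = a :: p.reverse :=
      stackStep_push _ _ (by intro t ht; rw [List.head?_reverse] at ht; exact hbound t ht)
    have hpchain : List.IsChain (fun x y => pairMatch x y = false) p :=
      (List.isChain_append.mp hinv1).1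
    have ga : (p ++ a :: b :: r).getD p.length "" = a := by
      simp [List.getD_eq_getElem?_getD]
    have gb : (p ++ a :: b :: r).getD (p.length + 1) "" = b := by
      rw [List.getD_eq_getElem?_getD, List.getElem?_append_right (by omega)]
      simp
    have hmm : 2 * (p.length + (a :: b :: r).length) - p.length < n + 1 := hm
    simp only [List.length_cons] at hmm
    rw [deleteSubLoop]
    rw [if_pos (by simp), if_neg (by simp), ga, gb]
    by_cases hab : pairMatch a b = true
    case neg =>
      -- no match: advance
      have hab' : pairMatch a b = false := by simpa using hab
      rw [if_pair_false _ _ _ _ _ hab']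
      have hre : p ++ a :: b :: r = (p ++ [a]) ++ (b :: r) := by simp
      have hchain2 : List.IsChain (fun x y => pairMatch x y = false)
          ((p ++ [a]) ++ (b :: r).take 1) := by
        simp only [List.take_succ_cons, List.take_zero]
        exact List.isChain_append.mpr ⟨hinv1, by simp, by simp [hab']⟩
      have hih := ih (p ++ [a]) (b :: r) (by simp; omega) hchain2
      have hlen : p.length + 1 = (p ++ [a]).length := by simp
      rw [hre, hlen, hih]
      simp [hpush]
    case pos =>
      rw [if_pair_true _ _ _ _ _ hab]
      rw [show (if (a == "A" && b == "B") = true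
            then deleteSubLoop n ((p ++ a :: b :: r).take p.length ++ (p ++ a :: b :: r).drop (p.length + 2))
              (if 0 < p.length then p.length - 1 else p.length)
            else deleteSubLoop n ((p ++ a :: b :: r).take p.length ++ (p ++ a :: b :: r).drop (p.length + 2))
              (if 0 < p.length then p.length - 1 else p.length))
          = deleteSubLoop n ((p ++ a :: b :: r).take p.length ++ (p ++ a :: b :: r).drop (p.length + 2))
              (if 0 < p.length then p.length - 1 else p.length) from ite_self _]
      rw [List.take_left]
      rw [show (p ++ a :: b :: r).drop (p.length + 2) = r by rw [List.drop_append]; simp]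
      have hfold : List.foldl stackStep p.reverse (a :: b :: r)
          = List.foldl stackStep p.reverse r := by
        rw [List.foldl_cons, hpush, List.foldl_cons, stackStep_pop _ _ _ hab]
      rw [hfold]
      rcases p.eq_nil_or_concat with rfl | ⟨q, t, rfl⟩
      · rw [if_neg (by simp)]
        have hih := ih [] r (by simp at hmm ⊢; omega) (by cases r <;> simp)
        simpa using hih
      · simp only [List.concat_eq_append] at *
        rw [if_pos (by simp)]
        have hq := List.isChain_append.mp hpchain
        have hqbound : ∀ u, q.getLast? = some u → pairMatch u t = false :=
          fun u hu => hq.2.2 u hu t rfl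
        have hqpush : stackStep q.reverse t = t :: q.reverse :=
          stackStep_push _ _ (by intro u hu; rw [List.head?_reverse] at hu; exact hqbound u hu)
        have hchain2 : List.IsChain (fun x y => pairMatch x y = false)
            (q ++ (t :: r).take 1) := by
          simpa using hpchain
        have hih := ih q (t :: r) (by simp at hmm ⊢; omega) hchain2
        rw [show (q ++ [t]).length - 1 = q.length by simp]
        rw [show (q ++ [t]) ++ r = q ++ (t :: r) by simp]
        rw [hih]
        simp [hqpush]

-- ===== VERDICT (by name: the statement is the Claim_ definition above) =====
theorem deleteSub_spec : Claim_equal_deleteSub := by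
  intro s _
  unfold Spec_deleteSub
  have h := deleteSubLoop_eq_stack (2 * s.length + 1) [] s (by simp) (by cases s <;> simp)
  simpa [deleteSub, deleteSub_alt] using h
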